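-- pv_equiv track=rewrite | github.com/RecardoWong/lobster-workspace | scripts/twitter_summary_monitor.py | summarize_elon
-- ===== SOURCE A (Python) =====
-- def summarize_elon(tweets):
--     """概括Elon的推文"""
--     key_points = []
--     has_xai = any('xAI' in t for t in tweets)
--     has_starlink = any('Starlink' in t for t in tweets)
--     has_tesla = any('Tesla' in t or 'FSD' in t for t in tweets)
--     has_grok = any('Grok' in t for t in tweets)
--
--     if has_xai:
--         key_points.append('xAI进展')
--     if has_grok:
--         key_points.append('Grok更新')
--     if has_starlink:
--         key_points.append('Starlink动态')
--     if has_tesla: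
--         key_points.append('Tesla/FSD相关')
--
--     return key_points if key_points else ['日常更新']
-- ===== SOURCE B (Python) =====
-- ELON_TAGS = [
--     ('xAI进展', ['xAI']),
--     ('Grok更新', ['Grok']),
--     ('Starlink动态', ['Starlink']),
--     ('Tesla/FSD相关', ['Tesla', 'FSD']),
-- ]
--
-- def summarize_elon(tweets):
--     """概括Elon的推文 — table-driven single pass over tweets."""
--     matched = set()
--     for t in tweets:
--         for tag, kws in ELON_TAGS:
--             if any(k in t for k in kws):
--                 matched.add(tag)
--     key_points = [tag for tag, _ in ELON_TAGS if tag in matched]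
--     return key_points if key_points else ['日常更新']
-- ===== Notes on version B (the rewrite author's own statement) =====
-- stated objective: alternative
-- what changed: Replaces four separate any()-scans over the tweet list plus an if-chain by a data-driven design: one ordered (tag, keywords) table, a single pass over the tweets recording matched tags into a set, then one pass over the table to emit tags in the fixed order.
import Mathlib
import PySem

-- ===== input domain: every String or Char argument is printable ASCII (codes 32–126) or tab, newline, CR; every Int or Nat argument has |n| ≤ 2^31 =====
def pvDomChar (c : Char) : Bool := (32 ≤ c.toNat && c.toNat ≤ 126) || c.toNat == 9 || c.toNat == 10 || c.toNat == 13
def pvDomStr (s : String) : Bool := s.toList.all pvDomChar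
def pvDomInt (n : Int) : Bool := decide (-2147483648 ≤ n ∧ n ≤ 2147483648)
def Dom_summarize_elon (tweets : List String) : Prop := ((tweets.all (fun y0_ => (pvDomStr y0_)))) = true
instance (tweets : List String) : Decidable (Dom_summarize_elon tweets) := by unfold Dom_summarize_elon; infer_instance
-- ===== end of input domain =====

-- B replaces A's four separate any()-scans + if-chain by an ordered (tag, keywords) table,
-- one pass over tweets collecting matched tags into a set, then one pass over the table (alternative decomposition).

-- ===== PORT A =====
def summarize_elon (tweets : List String) : List String :=
  let key_points : List String := []
  let has_xai := tweets.any (fun t => PySem.Str.isIn "xAI" t)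
  let has_starlink := tweets.any (fun t => PySem.Str.isIn "Starlink" t)
  let has_tesla := tweets.any (fun t => PySem.Str.isIn "Tesla" t || PySem.Str.isIn "FSD" t)
  let has_grok := tweets.any (fun t => PySem.Str.isIn "Grok" t)
  let key_points := if has_xai then key_points ++ ["xAI进展"] else key_points
  let key_points := if has_grok then key_points ++ ["Grok更新"] else key_points
  let key_points := if has_starlink then key_points ++ ["Starlink动态"] else key_points
  let key_points := if has_tesla then key_points ++ ["Tesla/FSD相关"] else key_points
  if key_points ≠ [] then key_points else ["日常更新"]

-- ===== PORT B =====
def elonTable : List (String × List String) :=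
  [("xAI进展", ["xAI"]), ("Grok更新", ["Grok"]), ("Starlink动态", ["Starlink"]),
   ("Tesla/FSD相关", ["Tesla", "FSD"])]

def summarize_elon_alt (tweets : List String) : List String :=
  let matched : PySem.Set String :=
    tweets.foldl (fun s t =>
      elonTable.foldl (fun s p =>
        if p.2.any (fun k => PySem.Str.isIn k t) then PySem.Set.add s p.1 else s) s)
      PySem.Set.empty
  let key_points :=
    elonTable.foldl (fun acc p =>
      if PySem.Set.contains matched p.1 then acc ++ [p.1] else acc) ([] : List String)
  if key_points = [] then ["日常更新"] else key_points

-- ===== PRECONDITION & SPEC =====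
def Spec_summarize_elon (tweets : List String) (out : List String) : Prop := out = summarize_elon_alt tweets
instance (tweets : List String) (out : List String) : Decidable (Spec_summarize_elon tweets out) := by unfold Spec_summarize_elon; infer_instance

-- ===== CLAIM (what is proved, stated in full; the proofs are below) =====
def Claim_equal_summarize_elon : Prop := ∀ (tweets : List String), Dom_summarize_elon tweets → Spec_summarize_elon tweets (summarize_elon tweets)

-- ===== LEMMAS AND PROOFS =====

-- membership after one conditional-add pass over any tag table
theorem mem_table_fold (table : List (String × List String)) (cond : String × List String → Bool)
    (s : PySem.Set String) (x : String) :
    x ∈ table.foldl (fun s p => if cond p then PySem.Set.add s p.1 else s) s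
      ↔ x ∈ s ∨ ∃ p ∈ table, x = p.1 ∧ cond p := by
  induction table generalizing s with
  | nil => simp
  | cons p ps ih =>
    rw [List.foldl_cons, ih]
    by_cases h : cond p = true
    · rw [if_pos h]
      simp only [PySem.Set.mem_add, List.mem_cons]
      constructor
      · rintro ((hs | rfl) | ⟨q, hq, hx, hc⟩)
        · exact Or.inl hs
        · exact Or.inr ⟨p, Or.inl rfl, rfl, h⟩
        · exact Or.inr ⟨q, Or.inr hq, hx, hc⟩
      · rintro (hs | ⟨q, (rfl | hq), hx, hc⟩)
        · exact Or.inl (Or.inl hs)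
        · exact Or.inl (Or.inr hx)
        · exact Or.inr ⟨q, hq, hx, hc⟩
    · rw [if_neg h]
      simp only [List.mem_cons]
      constructor
      · rintro (hs | ⟨q, hq, hx, hc⟩)
        · exact Or.inl hs
        · exact Or.inr ⟨q, Or.inr hq, hx, hc⟩
      · rintro (hs | ⟨q, (rfl | hq), hx, hc⟩)
        · exact Or.inl hs
        · exact absurd hc h
        · exact Or.inr ⟨q, hq, hx, hc⟩

-- membership in the matched set after the tweet loop
theorem mem_matched (tweets : List String) (s : PySem.Set String) (x : String) :
    x ∈ tweets.foldl (fun s t =>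
        elonTable.foldl (fun s p =>
          if p.2.any (fun k => PySem.Str.isIn k t) then PySem.Set.add s p.1 else s) s) s
      ↔ x ∈ s ∨ ∃ t ∈ tweets, ∃ p ∈ elonTable,
          x = p.1 ∧ p.2.any (fun k => PySem.Str.isIn k t) := by
  induction tweets generalizing s with
  | nil => simp
  | cons t ts ih =>
    rw [List.foldl_cons, ih, mem_table_fold]
    simp only [List.mem_cons]
    constructor
    · rintro ((h | ⟨p, hp, hx, hk⟩) | ⟨u, hu, hp⟩)
      · exact Or.inl h
      · exact Or.inr ⟨t, Or.inl rfl, p, hp, hx, hk⟩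
      · exact Or.inr ⟨u, Or.inr hu, hp⟩
    · rintro (h | ⟨u, (rfl | hu), hp⟩)
      · exact Or.inl (Or.inl h)
      · exact Or.inl (Or.inr hp)
      · exact Or.inr ⟨u, hu, hp⟩

theorem summarize_elon_spec : Claim_equal_summarize_elon := by
  intro tweets _
  unfold Spec_summarize_elon summarize_elon summarize_elon_alt
  have hc : ∀ x, PySem.Set.contains
      (tweets.foldl (fun s t =>
        elonTable.foldl (fun s p =>
          if p.2.any (fun k => PySem.Str.isIn k t) then PySem.Set.add s p.1 else s) s)
        PySem.Set.empty) x
      = tweets.any (fun t => decide (∃ p ∈ elonTable, x = p.1 ∧ p.2.any (fun k => PySem.Str.isIn k t))) := by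
    intro x
    rw [Bool.eq_iff_iff, PySem.Set.contains_iff, mem_matched, List.any_eq_true]
    simp [PySem.Set.empty]
  simp only [hc]
  simp only [elonTable, List.foldl]
  rcases Bool.eq_false_or_eq_true (tweets.any (fun t => PySem.Str.isIn "xAI" t)) with h1 | h1 <;>
  rcases Bool.eq_false_or_eq_true (tweets.any (fun t => PySem.Str.isIn "Grok" t)) with h2 | h2 <;>
  rcases Bool.eq_false_or_eq_true (tweets.any (fun t => PySem.Str.isIn "Starlink" t)) with h3 | h3 <;>
  rcases Bool.eq_false_or_eq_true (tweets.any (fun t => PySem.Str.isIn "Tesla" t || PySem.Str.isIn "FSD" t)) with h4 | h4 <;>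
  simp [h1, h2, h3, h4]
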